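-- pv_equiv track=rewrite | github.com/SwiftWinds/leetcode-py | mutate_the_array.py | mutateTheArray
-- ===== SOURCE A (Python) =====
-- def mutateTheArray(n, a):
--     b = []
--     for i, el in enumerate(a):
--         tot = el
--         if i - 1 >= 0:
--             tot += a[i - 1]
--         if i + 1 <= n - 1:
--             tot += a[i + 1]
--         b.append(tot)
--     return b
-- ===== SOURCE B (Python) =====
-- def mutateTheArray(n, a):
--     b = list(a)
--     for i in range(1, len(a)):
--         b[i] += a[i - 1]
--     for i in range(min(n, len(a)) - 1):
--         b[i] += a[i + 1]
--     return b
-- ===== Notes on version B (the rewrite author's own statement) =====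
-- stated objective: alternative
-- what changed: Replaces the single indexed loop with per-element boundary branches by copying the array and performing two branch-free shifted-addition passes (add left neighbors, then add right neighbors up to n-1).
import Mathlib
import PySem

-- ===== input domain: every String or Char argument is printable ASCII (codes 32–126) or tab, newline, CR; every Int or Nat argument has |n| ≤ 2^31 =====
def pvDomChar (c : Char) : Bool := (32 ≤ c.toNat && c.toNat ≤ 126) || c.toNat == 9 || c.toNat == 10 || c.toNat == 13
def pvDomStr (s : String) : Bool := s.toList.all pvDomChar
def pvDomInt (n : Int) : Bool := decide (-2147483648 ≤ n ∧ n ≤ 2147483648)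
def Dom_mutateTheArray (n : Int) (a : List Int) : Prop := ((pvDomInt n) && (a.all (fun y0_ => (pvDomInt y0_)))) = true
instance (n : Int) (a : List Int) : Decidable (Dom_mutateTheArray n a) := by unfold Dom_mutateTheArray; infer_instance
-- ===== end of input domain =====

-- B replaces A's single indexed loop with boundary branches by two branch-free
-- shifted-addition passes over a copy (objective: alternative decomposition).

-- ===== PORT A =====
def mutateTheArray (n : Int) (a : List Int) : List Int :=
  (PySem.List.enumerate a 0).foldl
    (fun b p =>
      let i := p.1
      let el := p.2
      let tot := el
      let tot := if i - 1 ≥ 0 then tot + PySem.List.pyGetD a (i - 1) 0 else tot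
      let tot := if i + 1 ≤ n - 1 then tot + PySem.List.pyGetD a (i + 1) 0 else tot
      b ++ [tot]) []

-- ===== PORT B =====
def mutateTheArray_alt (n : Int) (a : List Int) : List Int :=
  let b0 := a
  let b1 := (PySem.List.pyRange 1 (a.length : Int) 1).foldl
      (fun b i => PySem.List.pySetD b i (PySem.List.pyGetD b i 0 + PySem.List.pyGetD a (i - 1) 0)) b0
  let b2 := (PySem.List.pyRange 0 (min n (a.length : Int) - 1) 1).foldl
      (fun b i => PySem.List.pySetD b i (PySem.List.pyGetD b i 0 + PySem.List.pyGetD a (i + 1) 0)) b1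
  b2

-- ===== PRECONDITION & SPEC =====
-- Pre_ excludes exactly the inputs on which A raises IndexError: nonempty a with
-- n > len(a) (A trusts n as a's length and reads a[i+1] past the end).
def Pre_mutateTheArray (n : Int) (a : List Int) : Prop := a = [] ∨ n ≤ (a.length : Int)
instance (n : Int) (a : List Int) : Decidable (Pre_mutateTheArray n a) := by unfold Pre_mutateTheArray; infer_instance
def pvWitness_mutateTheArray : Int × List Int := (3, [1, 2, 3])

def Spec_mutateTheArray (n : Int) (a : List Int) (out : List Int) : Prop := out = mutateTheArray_alt n a
instance (n : Int) (a : List Int) (out : List Int) : Decidable (Spec_mutateTheArray n a out) := by unfold Spec_mutateTheArray; infer_instance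

-- ===== CLAIM (what is proved, stated in full; the proofs are below) =====
def Claim_equal_mutateTheArray : Prop := ∀ (n : Int) (a : List Int), Dom_mutateTheArray n a → Pre_mutateTheArray n a → Spec_mutateTheArray n a (mutateTheArray n a)

-- ===== LEMMAS AND PROOFS =====

-- One shifted-addition pass, characterised by getElem?: updating indices [s, s+m)
-- adds g j to position j; u is a snapshot agreeing with b from index s onwards.
lemma setpass (g : Int → Int) (u : List Int) :
    ∀ (m s : Nat) (b : List Int),
      (∀ j : Nat, s ≤ j → b[j]? = u[j]?) →
      ∀ j : Nat,
        ((PySem.List.pyRange (s : Int) ((s : Int) + (m : Int)) 1).foldl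
            (fun b i => PySem.List.pySetD b i (PySem.List.pyGetD b i 0 + g i)) b)[j]? =
          if s ≤ j ∧ j < s + m then (u[j]?).map (· + g (j : Int)) else b[j]? := by
  intro m
  induction m with
  | zero =>
    intro s b hb j
    have h0 : PySem.List.pyRange (s : Int) ((s : Int) + ((0 : Nat) : Int)) 1 = [] := by
      simp [PySem.List.pyRange_one]
    rw [h0]
    simp
  | succ m ih =>
    intro s b hb j
    have hcons : PySem.List.pyRange (s : Int) ((s : Int) + ((m + 1 : Nat) : Int)) 1
        = (s : Int) :: PySem.List.pyRange ((s : Int) + 1) ((s : Int) + ((m + 1 : Nat) : Int)) 1 :=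
      PySem.List.pyRange_one_cons (by push_cast; omega)
    have hcast : PySem.List.pyRange ((s : Int) + 1) ((s : Int) + ((m + 1 : Nat) : Int)) 1
        = PySem.List.pyRange (((s + 1 : Nat) : Int)) (((s + 1 : Nat) : Int) + ((m : Nat) : Int)) 1 := by
      congr 1 <;> push_cast <;> ring
    rw [hcons, hcast, List.foldl_cons]
    have hb1 : PySem.List.pySetD b (s : Int) (PySem.List.pyGetD b (s : Int) 0 + g s)
        = b.set s (b.getD s 0 + g s) := by
      simp
    rw [hb1]
    have hb' : ∀ j : Nat, s + 1 ≤ j → (b.set s (b.getD s 0 + g s))[j]? = u[j]? := by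
      intro j hj
      rw [List.getElem?_set_ne (by omega)]
      exact hb j (by omega)
    rw [ih (s + 1) _ hb' j]
    by_cases hjs : j = s
    · subst hjs
      rw [if_neg (by omega), if_pos (by omega)]
      by_cases hlen : j < b.length
      · have hbj : b[j]? = some b[j] := List.getElem?_eq_getElem hlen
        have hgd : b.getD j 0 = b[j] := by
          simp [List.getD_eq_getElem?_getD, hbj]
        have hu : u[j]? = some b[j] := by rw [← hb j (le_refl j), hbj]
        simp [List.getElem?_set_self', hlen, hgd, hu]
      · have hbj : b[j]? = none := by
          rw [List.getElem?_eq_none_iff]; omega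
        have hu : u[j]? = none := by rw [← hb j (le_refl j), hbj]
        have : (b.set j (b.getD j 0 + g j))[j]? = none := by
          simp [List.getElem?_set]; omega
        rw [this, hu]; simp
    · rw [List.getElem?_set_ne (by omega)]
      by_cases hin : s ≤ j ∧ j < s + (m + 1)
      · rw [if_pos (by omega), if_pos hin]
      · rw [if_neg (by omega), if_neg hin]

-- A as a map over the enumeration.
lemma portA_getElem? (n : Int) (a : List Int) (j : Nat) :
    (mutateTheArray n a)[j]? =
      (a[j]?).map (fun el =>
        (if (j : Int) - 1 ≥ 0 then el + PySem.List.pyGetD a ((j : Int) - 1) 0 else el) +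
          (if (j : Int) + 1 ≤ n - 1 then PySem.List.pyGetD a ((j : Int) + 1) 0 else 0)) := by
  unfold mutateTheArray
  rw [PySem.List.foldl_append_singleton_eq_map]
  rw [List.nil_append, List.getElem?_map, PySem.List.getElem?_enumerate]
  rcases a[j]? with _ | x
  · simp
  · simp only [Option.map_some]
    congr 1
    by_cases h2 : (0 : Int) + (j : Int) + 1 ≤ n - 1 <;>
      by_cases h1 : (0 : Int) + (j : Int) - 1 ≥ 0 <;>
        simp only [zero_add] at * <;>
          simp [h1, h2] <;> omega

-- ===== VERDICT (by name: the statement is the Claim_ definition above) =====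
theorem mutateTheArray_spec : Claim_equal_mutateTheArray := by
  intro n a _ hpre
  unfold Spec_mutateTheArray
  rcases eq_or_ne a [] with rfl | hne
  · unfold mutateTheArray mutateTheArray_alt
    have e1 : PySem.List.pyRange 1 ((List.length ([] : List Int)) : Int) 1 = [] := by
      rw [PySem.List.pyRange_one]
      simp
    have e2 : PySem.List.pyRange 0 (min n ((List.length ([] : List Int)) : Int) - 1) 1 = [] := by
      rw [PySem.List.pyRange_one]
      have : (min n ((List.length ([] : List Int)) : Int) - 1 - 0).toNat = 0 := by simp
      rw [this]
      simp
    rw [e1, e2]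
    simp
  · have hn : n ≤ (a.length : Int) := hpre.resolve_left hne
    have hL1 : 1 ≤ a.length := List.length_pos_of_ne_nil hne
    have hr1 : PySem.List.pyRange 1 ((a.length : Nat) : Int) 1
        = PySem.List.pyRange (((1 : Nat) : Int)) (((1 : Nat) : Int) + ((a.length - 1 : Nat) : Int)) 1 := by
      rw [PySem.List.pyRange_one, PySem.List.pyRange_one]
      have e : (((1 : Nat) : Int) + ((a.length - 1 : Nat) : Int) - ((1 : Nat) : Int)).toNat
          = (((a.length : Nat) : Int) - 1).toNat := by omega
      rw [e]
      norm_num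
    have hr2 : PySem.List.pyRange 0 (min n ((a.length : Nat) : Int) - 1) 1
        = PySem.List.pyRange (((0 : Nat) : Int))
            (((0 : Nat) : Int) + (((min n ((a.length : Nat) : Int) - 1).toNat : Nat) : Int)) 1 := by
      rw [PySem.List.pyRange_one, PySem.List.pyRange_one]
      have e : (((0 : Nat) : Int) + (((min n ((a.length : Nat) : Int) - 1).toNat : Nat) : Int) - ((0 : Nat) : Int)).toNat
          = (min n ((a.length : Nat) : Int) - 1 - 0).toNat := by omega
      rw [e]
      norm_num
    have h1 : ∀ k : Nat,
        ((PySem.List.pyRange (((1 : Nat) : Int)) (((1 : Nat) : Int) + ((a.length - 1 : Nat) : Int)) 1).foldl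
            (fun b i => PySem.List.pySetD b i (PySem.List.pyGetD b i 0 + PySem.List.pyGetD a (i - 1) 0)) a)[k]? =
          if 1 ≤ k ∧ k < 1 + (a.length - 1) then (a[k]?).map (· + PySem.List.pyGetD a ((k : Int) - 1) 0) else a[k]? :=
      setpass _ a (a.length - 1) 1 a (fun _ _ => rfl)
    apply List.ext_getElem?
    intro j
    rw [portA_getElem? n a j]
    unfold mutateTheArray_alt
    rw [hr1, hr2]
    have h2 :
        ((PySem.List.pyRange (((0 : Nat) : Int))
              (((0 : Nat) : Int) + (((min n ((a.length : Nat) : Int) - 1).toNat : Nat) : Int)) 1).foldl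
            (fun b i => PySem.List.pySetD b i (PySem.List.pyGetD b i 0 + PySem.List.pyGetD a (i + 1) 0))
            ((PySem.List.pyRange (((1 : Nat) : Int)) (((1 : Nat) : Int) + ((a.length - 1 : Nat) : Int)) 1).foldl
              (fun b i => PySem.List.pySetD b i (PySem.List.pyGetD b i 0 + PySem.List.pyGetD a (i - 1) 0)) a))[j]? =
          if 0 ≤ j ∧ j < 0 + (min n ((a.length : Nat) : Int) - 1).toNat then
            ((if 1 ≤ j ∧ j < 1 + (a.length - 1) then (a[j]?).map (· + PySem.List.pyGetD a ((j : Int) - 1) 0) else a[j]?).map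
              (· + PySem.List.pyGetD a ((j : Int) + 1) 0))
          else
            (if 1 ≤ j ∧ j < 1 + (a.length - 1) then (a[j]?).map (· + PySem.List.pyGetD a ((j : Int) - 1) 0) else a[j]?) := by
      have h2' := setpass (fun i => PySem.List.pyGetD a (i + 1) 0)
        ((PySem.List.pyRange (((1 : Nat) : Int)) (((1 : Nat) : Int) + ((a.length - 1 : Nat) : Int)) 1).foldl
          (fun b i => PySem.List.pySetD b i (PySem.List.pyGetD b i 0 + PySem.List.pyGetD a (i - 1) 0)) a)
        ((min n ((a.length : Nat) : Int) - 1).toNat) 0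
        ((PySem.List.pyRange (((1 : Nat) : Int)) (((1 : Nat) : Int) + ((a.length - 1 : Nat) : Int)) 1).foldl
          (fun b i => PySem.List.pySetD b i (PySem.List.pyGetD b i 0 + PySem.List.pyGetD a (i - 1) 0)) a)
        (fun _ _ => rfl) j
      rw [h2']
      rw [h1 j]
    rw [h2]
    rcases hja : a[j]? with _ | x
    · have hjL : a.length ≤ j := by
        rw [List.getElem?_eq_none_iff] at hja
        omega
      rw [if_neg (by omega), if_neg (by omega)]
      simp
    · obtain ⟨hjL, -⟩ := List.getElem?_eq_some_iff.mp hja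
      simp only [Option.map_some, apply_ite (Option.map (· + PySem.List.pyGetD a ((j : Int) + 1) 0)),
        Option.map_some]
      split_ifs <;> simp only [Option.some.injEq] <;> first | (exfalso; omega) | ring
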